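-- pv_equiv track=rewrite | github.com/MaxKlat29/REG_ML_BERT | src/evaluation/metrics.py | spans_to_bio
-- ===== SOURCE A (Python) =====
-- def spans_to_bio(
--     text: str,
--     char_spans: list[tuple[int, int]],
-- ) -> tuple[list[str], list[str]]:
--     """Convert character-level spans to BIO token labels.
--
--     Whitespace-tokenizes text, computes each token's character range,
--     and maps to B-REF/I-REF/O based on overlap with spans.
--
--     Args:
--         text: Raw input text.
--         char_spans: List of (start, end) character offset spans.
--
--     Returns:
--         Tuple of (tokens, bio_labels).
--     """
--     tokens: list[str] = []
--     token_ranges: list[tuple[int, int]] = []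
--
--     # Whitespace tokenization with character offset tracking
--     i = 0
--     while i < len(text):
--         if text[i].isspace():
--             i += 1
--             continue
--         start = i
--         while i < len(text) and not text[i].isspace():
--             i += 1
--         tokens.append(text[start:i])
--         token_ranges.append((start, i))
--
--     labels: list[str] = []
--     for tok_start, tok_end in token_ranges:
--         label = "O"
--         for span_start, span_end in char_spans:
--             # Token overlaps with span if they intersect
--             if tok_start < span_end and tok_end > span_start:
--                 # B-REF if this is the first token in the span
--                 if tok_start <= span_start:
--                     label = "B-REF"
--                 else:
--                     label = "I-REF"
--                 break
--         labels.append(label)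
--
--     return tokens, labels
-- ===== SOURCE B (Python) =====
-- def spans_to_bio(
--     text: str,
--     char_spans: list[tuple[int, int]],
-- ) -> tuple[list[str], list[str]]:
--     """Single-pass char-fold tokenizer + span-major interval painting with binary search."""
--     tokens: list[str] = []
--     starts: list[int] = []
--     ends: list[int] = []
--     start = None
--     for i, ch in enumerate(text):
--         if ch.isspace():
--             if start is not None:
--                 tokens.append(text[start:i])
--                 starts.append(start)
--                 ends.append(i)
--                 start = None
--         else:
--             if start is None:
--                 start = i
--     if start is not None:
--         tokens.append(text[start:])
--         starts.append(start)
--         ends.append(len(text))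
--
--     labels: list = [None] * len(tokens)
--     for ss, se in char_spans:
--         lo = _first_gt(ends, ss)     # first token whose end exceeds span start
--         hi = _first_ge(starts, se)   # first token whose start reaches span end
--         for j in range(lo, hi):
--             if labels[j] is None:
--                 labels[j] = "B-REF" if starts[j] <= ss else "I-REF"
--     return tokens, [l if l is not None else "O" for l in labels]
--
--
-- def _first_gt(xs, x):
--     lo, hi = 0, len(xs)
--     while lo < hi:
--         mid = (lo + hi) // 2
--         if xs[mid] <= x:
--             lo = mid + 1
--         else:
--             hi = mid
--     return lo
--
--
-- def _first_ge(xs, x):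
--     lo, hi = 0, len(xs)
--     while lo < hi:
--         mid = (lo + hi) // 2
--         if xs[mid] < x:
--             lo = mid + 1
--         else:
--             hi = mid
--     return lo
-- ===== Notes on version B (the rewrite author's own statement) =====
-- stated objective: faster
-- what changed: A whitespace-tokenizes with index-based while loops and labels each token by a linear scan over all spans (token-major); B tokenizes in a single char-by-char fold with an open-token accumulator and then paints labels span-major: each span is binary-searched to its contiguous range of overlapping tokens and only still-unlabelled tokens in that range are painted, which preserves A's first-matching-span semantics.
import Mathlib
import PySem

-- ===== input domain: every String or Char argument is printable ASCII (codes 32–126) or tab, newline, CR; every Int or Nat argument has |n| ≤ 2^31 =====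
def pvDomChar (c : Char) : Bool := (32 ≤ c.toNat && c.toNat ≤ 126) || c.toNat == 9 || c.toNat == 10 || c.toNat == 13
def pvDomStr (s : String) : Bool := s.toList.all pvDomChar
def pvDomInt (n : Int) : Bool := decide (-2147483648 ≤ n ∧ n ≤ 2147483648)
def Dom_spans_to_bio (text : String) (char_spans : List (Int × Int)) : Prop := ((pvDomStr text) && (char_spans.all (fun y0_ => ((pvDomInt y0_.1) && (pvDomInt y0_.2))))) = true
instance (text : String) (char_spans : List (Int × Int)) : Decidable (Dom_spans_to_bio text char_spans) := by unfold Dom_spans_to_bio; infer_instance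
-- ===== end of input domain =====

-- B re-implements A with a one-pass char-fold tokenizer and span-major interval painting
-- via binary search, instead of A's per-token linear scan over all spans; return values
-- are proved identical on all inputs.

-- ===== PORT A =====
def tokA : List Char → Nat → List (List Char × Nat × Nat)
  | [], _ => []
  | c :: rest, i =>
    if PySem.Chars.isspace c then tokA rest (i+1)
    else
      let tk := (c :: rest).takeWhile (fun d => !PySem.Chars.isspace d)
      (tk, i, i + tk.length) :: tokA ((c :: rest).drop tk.length) (i + tk.length)
  termination_by cs => cs.length
  decreasing_by all_goals simp_all

def labA : List (Int × Int) → Int → Int → String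
  | [], _, _ => "O"
  | (ss, se) :: rest, ts, te =>
    if ts < se ∧ te > ss then (if ts ≤ ss then "B-REF" else "I-REF") else labA rest ts te

def spans_to_bio (text : String) (char_spans : List (Int × Int)) : List String × List String :=
  let R := tokA text.toList 0
  (R.map (fun t => String.ofList t.1),
   R.map (fun t => labA char_spans ((t.2.1 : Nat) : Int) ((t.2.2 : Nat) : Int)))

-- ===== PORT B =====
def stepB (cs0 : List Char) (st : List (List Char) × List Int × List Int × Option Nat)
    (ic : Char × Nat) : List (List Char) × List Int × List Int × Option Nat :=
  match st with
  | (toks, starts, ends, cur) =>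
    if PySem.Chars.isspace ic.1 then
      match cur with
      | some s => (toks ++ [(cs0.drop s).take (ic.2 - s)], starts ++ [((s : Nat) : Int)],
                   ends ++ [((ic.2 : Nat) : Int)], none)
      | none => (toks, starts, ends, none)
    else
      match cur with
      | none => (toks, starts, ends, some ic.2)
      | some s => (toks, starts, ends, some s)

def finalizeB (cs0 : List Char) (st : List (List Char) × List Int × List Int × Option Nat) :
    List (List Char) × List Int × List Int :=
  match st with
  | (toks, starts, ends, none) => (toks, starts, ends)
  | (toks, starts, ends, some s) =>
      (toks ++ [cs0.drop s], starts ++ [((s : Nat) : Int)], ends ++ [((cs0.length : Nat) : Int)])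

def tokB (cs0 : List Char) : List (List Char) × List Int × List Int :=
  finalizeB cs0 (cs0.zipIdx.foldl (stepB cs0) ([], [], [], none))

def bsRight (xs : List Int) (x : Int) (lo hi : Nat) : Nat :=
  if h : lo < hi then
    let mid := (lo + hi) / 2
    if xs.getD mid 0 ≤ x then bsRight xs x (mid + 1) hi else bsRight xs x lo mid
  else lo
  termination_by hi - lo
  decreasing_by all_goals omega

def bsLeft (xs : List Int) (x : Int) (lo hi : Nat) : Nat :=
  if h : lo < hi then
    let mid := (lo + hi) / 2
    if xs.getD mid 0 < x then bsLeft xs x (mid + 1) hi else bsLeft xs x lo mid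
  else lo
  termination_by hi - lo
  decreasing_by all_goals omega

def paintStep (starts ends : List Int) (labels : List (Option String)) (sp : Int × Int) :
    List (Option String) :=
  let lo := bsRight ends sp.1 0 ends.length
  let hi := bsLeft starts sp.2 0 starts.length
  (List.range' lo (hi - lo)).foldl
    (fun lbs j =>
      if lbs.getD j none = none then
        lbs.set j (some (if starts.getD j 0 ≤ sp.1 then "B-REF" else "I-REF"))
      else lbs) labels

def spans_to_bio_alt (text : String) (char_spans : List (Int × Int)) : List String × List String :=
  match tokB text.toList with
  | (toks, starts, ends) =>
    let labels := char_spans.foldl (paintStep starts ends) (List.replicate toks.length none)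
    (toks.map String.ofList, labels.map (fun o => o.getD "O"))

-- ===== PRECONDITION & SPEC =====
-- ===== PRECONDITION & SPEC =====
def Spec_spans_to_bio (text : String) (char_spans : List (Int × Int)) (out : List String × List String) : Prop := out = spans_to_bio_alt text char_spans
instance (text : String) (char_spans : List (Int × Int)) (out : List String × List String) : Decidable (Spec_spans_to_bio text char_spans out) := by unfold Spec_spans_to_bio; infer_instance

-- ===== CLAIM (what is proved, stated in full; the proofs are below) =====
def Claim_equal_spans_to_bio : Prop := ∀ (text : String) (char_spans : List (Int × Int)), Dom_spans_to_bio text char_spans → Spec_spans_to_bio text char_spans (spans_to_bio text char_spans)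

-- ===== LEMMAS AND PROOFS =====

lemma fold_chunk (cs0 : List Char) :
    ∀ (tk : List Char), (∀ c ∈ tk, PySem.Chars.isspace c = false) →
    ∀ (i : Nat) (toks : List (List Char)) (starts ends : List Int) (s : Nat),
      (tk.zipIdx i).foldl (stepB cs0) (toks, starts, ends, some s) = (toks, starts, ends, some s) := by
  intro tk
  induction tk with
  | nil => intro _ i toks starts ends s; simp
  | cons c tl ih =>
    intro h i toks starts ends s
    have hc : PySem.Chars.isspace c = false := h c (List.mem_cons_self ..)
    rw [List.zipIdx_cons, List.foldl_cons]
    simp only [stepB, hc]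
    exact ih (fun d hd => h d (List.mem_cons_of_mem _ hd)) (i+1) toks starts ends s

lemma tokenize_agree (cs0 : List Char) :
    ∀ (cs : List Char) (i : Nat), cs0.drop i = cs →
    ∀ (toks : List (List Char)) (starts ends : List Int),
      finalizeB cs0 ((cs.zipIdx i).foldl (stepB cs0) (toks, starts, ends, none)) =
        (toks ++ (tokA cs i).map (fun t => t.1),
         starts ++ (tokA cs i).map (fun t => ((t.2.1 : Nat) : Int)),
         ends ++ (tokA cs i).map (fun t => ((t.2.2 : Nat) : Int))) := by
  intro cs i
  induction cs, i using tokA.induct with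
  | case1 i =>
    intro hdrop toks starts ends
    simp [tokA, finalizeB]
  | case2 c rest i hc ih =>
    intro hdrop toks starts ends
    have hdrop' : cs0.drop (i + 1) = rest := by
      rw [← List.drop_drop, hdrop, List.drop_one, List.tail_cons]
    rw [List.zipIdx_cons, List.foldl_cons]
    simp only [stepB, hc, if_pos]
    rw [tokA, if_pos hc]
    exact ih hdrop' toks starts ends
  | case3 c rest i hc tk ih =>
    intro hdrop toks starts ends
    have htkdef : tk = (c :: rest).takeWhile (fun d => !PySem.Chars.isspace d) := rfl
    have htokA : tokA (c :: rest) i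
        = (tk, i, i + tk.length) :: tokA ((c :: rest).drop tk.length) (i + tk.length) := by
      rw [tokA, if_neg hc]
    clear_value tk
    have htkcons : tk = c :: rest.takeWhile (fun d => !PySem.Chars.isspace d) := by
      rw [htkdef]; simp [hc]
    have htklen : 1 ≤ tk.length := by rw [htkcons]; simp
    have htknonsp : ∀ d ∈ tk, PySem.Chars.isspace d = false := by
      intro d hd
      rw [htkdef] at hd
      have := List.mem_takeWhile_imp (l := c :: rest) hd
      simpa using this
    have hsplit : tk ++ (c :: rest).dropWhile (fun d => !PySem.Chars.isspace d) = c :: rest := by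
      rw [htkdef]; exact List.takeWhile_append_dropWhile
    set rest' := (c :: rest).dropWhile (fun d => !PySem.Chars.isspace d) with hrest'
    clear_value rest'
    have hdropeq : (c :: rest).drop tk.length = rest' := by
      calc (c :: rest).drop tk.length
          = (tk ++ rest').drop tk.length := by rw [hsplit]
        _ = rest' := List.drop_left
    -- A's step
    rw [htokA, hdropeq]
    -- split the fold into the chunk and the remainder
    have hzip : (c :: rest).zipIdx i = tk.zipIdx i ++ rest'.zipIdx (i + tk.length) := by
      rw [← hsplit, List.zipIdx_append]
    rw [hzip, List.foldl_append]
    -- fold over the chunk opens a token at i and keeps it open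
    have hchunk : (tk.zipIdx i).foldl (stepB cs0) (toks, starts, ends, none)
        = (toks, starts, ends, some i) := by
      rw [htkcons, List.zipIdx_cons, List.foldl_cons]
      simp only [stepB, hc]
      exact fold_chunk cs0 _ (fun d hd => htknonsp d (htkcons ▸ List.mem_cons_of_mem _ hd)) _ _ _ _ _
    rw [hchunk]
    -- bookkeeping about positions
    have hlen_drop : (cs0.drop i).length = cs0.length - i := List.length_drop
    have hipos : i ≤ cs0.length := by
      by_contra hgt
      rw [List.drop_eq_nil_of_le (by omega)] at hdrop
      simp at hdrop
    have hcslen : cs0.length - i = (c :: rest).length := by rw [← hdrop]; exact hlen_drop.symm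
    -- case split on the remainder
    cases hR : rest' with
    | nil =>
      -- token runs to the end of the text
      subst hR
      simp only [List.append_nil] at hsplit
      simp only [List.zipIdx_nil, List.foldl_nil, finalizeB, tokA]
      have h1 : cs0.drop i = tk := by rw [hdrop, hsplit]
      have hend : cs0.length = i + tk.length := by
        have h2 := congrArg List.length hsplit
        simp only [List.length_cons] at h2 hcslen
        omega
      simp [h1, hend]
    | cons d rest'' =>
      subst hR
      -- the run is ended by a whitespace character d
      have hd : PySem.Chars.isspace d = true := by
        have hw : List.dropWhile (fun x => !PySem.Chars.isspace x) (c :: rest) ≠ [] := by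
          rw [← hrest']; simp
        have h4 := List.head_dropWhile_not (l := c :: rest) (fun x => !PySem.Chars.isspace x) hw
        simp only [← hrest', List.head_cons] at h4
        simpa using h4
      rw [List.zipIdx_cons, List.foldl_cons]
      -- the flush step
      have hflush : stepB cs0 (toks, starts, ends, some i) (d, i + tk.length)
          = (toks ++ [tk], starts ++ [((i : Nat) : Int)], ends ++ [((i + tk.length : Nat) : Int)], none) := by
        simp only [stepB, hd, if_pos]
        have htake : (cs0.drop i).take (i + tk.length - i) = tk := by
          rw [hdrop, ← hsplit]
          have h5 : i + tk.length - i = tk.length := by omega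
          rw [h5]
          exact List.take_left' rfl
        rw [htake]
      rw [hflush]
      -- IH for the remainder of the text (its first step skips the space d itself)
      have hdroprest : cs0.drop (i + tk.length) = d :: rest'' := by
        rw [← List.drop_drop, hdrop, hdropeq]
      have ih' := ih (by rw [hdropeq]; exact hdroprest) (toks ++ [tk])
        (starts ++ [((i : Nat) : Int)]) (ends ++ [((i + tk.length : Nat) : Int)])
      rw [hdropeq, List.zipIdx_cons, List.foldl_cons] at ih'
      simp only [stepB, hd, if_pos] at ih'
      rw [ih', tokA, if_pos hd]
      simp [List.append_assoc]

lemma tokB_eq (cs0 : List Char) :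
    tokB cs0 = ((tokA cs0 0).map (fun t => t.1),
                (tokA cs0 0).map (fun t => ((t.2.1 : Nat) : Int)),
                (tokA cs0 0).map (fun t => ((t.2.2 : Nat) : Int))) := by
  have := tokenize_agree cs0 cs0 0 (by simp) [] [] []
  simpa [tokB] using this

-- ordering invariant of A's token ranges

def Ordered : Int → List (Int × Int) → Prop
  | _, [] => True
  | b, (s, e) :: r => b ≤ s ∧ s < e ∧ Ordered e r

def rangesOf (cs : List Char) (i : Nat) : List (Int × Int) :=
  (tokA cs i).map (fun t => (((t.2.1 : Nat) : Int), ((t.2.2 : Nat) : Int)))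

lemma ordered_mono {b b' : Int} {L : List (Int × Int)} (h : b' ≤ b) (ho : Ordered b L) :
    Ordered b' L := by
  cases L with
  | nil => trivial
  | cons p r => obtain ⟨h1, h2, h3⟩ := ho; exact ⟨le_trans h h1, h2, h3⟩

lemma tokA_ordered : ∀ (cs : List Char) (i : Nat), Ordered (i : Int) (rangesOf cs i) := by
  intro cs i
  induction cs, i using tokA.induct with
  | case1 i => simp [rangesOf, tokA, Ordered]
  | case2 c rest i hc ih =>
    rw [rangesOf, tokA, if_pos hc]
    exact ordered_mono (by push_cast; omega) ih
  | case3 c rest i hc tk ih =>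
    rw [rangesOf, tokA, if_neg hc]
    refine ⟨le_refl _, ?_, ?_⟩
    · have h1 : 1 ≤ ((c :: rest).takeWhile (fun d => !PySem.Chars.isspace d)).length := by
        simp [hc]
      push_cast
      omega
    · exact ih

lemma ordered_bound {b : Int} {L : List (Int × Int)} (ho : Ordered b L) :
    ∀ p ∈ L, b ≤ p.1 ∧ p.1 < p.2 := by
  induction L generalizing b with
  | nil => simp
  | cons q r ih =>
    obtain ⟨h1, h2, h3⟩ := ho
    intro p hp
    rcases List.mem_cons.mp hp with rfl | hp
    · exact ⟨h1, h2⟩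
    · have := ih h3 p hp; exact ⟨by linarith [this.1], this.2⟩

lemma ordered_pairwise {b : Int} {L : List (Int × Int)} (ho : Ordered b L) :
    List.Pairwise (fun p q => p.2 ≤ q.1) L := by
  induction L generalizing b with
  | nil => exact List.Pairwise.nil
  | cons q r ih =>
    obtain ⟨h1, h2, h3⟩ := ho
    exact List.Pairwise.cons (fun p hp => (ordered_bound h3 p hp).1) (ih h3)

-- monotonicity of the projected start/end lists

lemma ordered_mono_getElem {b : Int} {L : List (Int × Int)} (ho : Ordered b L)
    {j k : Nat} (hjk : j ≤ k) (hk : k < L.length) (hj : j < L.length) :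
    L[j].1 ≤ L[k].1 ∧ L[j].2 ≤ L[k].2 := by
  rcases eq_or_lt_of_le hjk with rfl | hlt
  · exact ⟨le_refl _, le_refl _⟩
  · have hpw := ordered_pairwise ho
    have h1 := (List.pairwise_iff_getElem.mp hpw) j k hj hk hlt
    have h2 := (ordered_bound ho) L[j] (List.getElem_mem _)
    have h3 := (ordered_bound ho) L[k] (List.getElem_mem _)
    constructor <;> linarith [h2.2, h3.2]

-- binary search characterisations

lemma bsRight_char (xs : List Int) (x : Int)
    (mono : ∀ j k, j ≤ k → k < xs.length → j < xs.length → xs.getD j 0 ≤ xs.getD k 0) :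
    ∀ (d lo hi : Nat), hi - lo ≤ d → hi ≤ xs.length → lo ≤ hi →
      (∀ j, j < lo → xs.getD j 0 ≤ x) →
      (∀ j, hi ≤ j → j < xs.length → x < xs.getD j 0) →
      lo ≤ bsRight xs x lo hi ∧ bsRight xs x lo hi ≤ hi ∧
        ∀ j, j < xs.length → (xs.getD j 0 ≤ x ↔ j < bsRight xs x lo hi) := by
  intro d
  induction d with
  | zero =>
    intro lo hi hd hhi hlohi hlow hhigh
    have : lo = hi := by omega
    subst this
    rw [bsRight, dif_neg (by omega)]
    refine ⟨le_refl _, le_refl _, fun j hj => ?_⟩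
    constructor
    · intro hle
      by_contra hge
      exact absurd hle (not_le.mpr (hhigh j (by omega) hj))
    · intro hlt
      exact hlow j hlt
  | succ m ih =>
    intro lo hi hd hhi hlohi hlow hhigh
    by_cases h : lo < hi
    · rw [bsRight, dif_pos h]
      simp only []
      by_cases hmid : xs.getD ((lo + hi) / 2) 0 ≤ x
      · rw [if_pos hmid]
        have ih' := ih ((lo + hi) / 2 + 1) hi (by omega) hhi (by omega)
          (fun j hj => le_trans (mono j ((lo + hi) / 2) (by omega) (by omega) (by omega)) hmid)
          hhigh
        exact ⟨by omega, ih'.2.1, ih'.2.2⟩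
      · rw [if_neg hmid]
        rw [not_le] at hmid
        have ih' := ih lo ((lo + hi) / 2) (by omega) (by omega) (by omega) hlow
          (fun j hj hjlen => lt_of_lt_of_le hmid (mono ((lo + hi) / 2) j hj (by omega) (by omega)))
        exact ⟨ih'.1, by omega, ih'.2.2⟩
    · rw [bsRight, dif_neg h]
      have : lo = hi := by omega
      subst this
      refine ⟨le_refl _, le_refl _, fun j hj => ?_⟩
      constructor
      · intro hle
        by_contra hge
        exact absurd hle (not_le.mpr (hhigh j (by omega) hj))
      · intro hlt
        exact hlow j hlt

lemma bsLeft_char (xs : List Int) (x : Int)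
    (mono : ∀ j k, j ≤ k → k < xs.length → j < xs.length → xs.getD j 0 ≤ xs.getD k 0) :
    ∀ (d lo hi : Nat), hi - lo ≤ d → hi ≤ xs.length → lo ≤ hi →
      (∀ j, j < lo → xs.getD j 0 < x) →
      (∀ j, hi ≤ j → j < xs.length → x ≤ xs.getD j 0) →
      lo ≤ bsLeft xs x lo hi ∧ bsLeft xs x lo hi ≤ hi ∧
        ∀ j, j < xs.length → (xs.getD j 0 < x ↔ j < bsLeft xs x lo hi) := by
  intro d
  induction d with
  | zero =>
    intro lo hi hd hhi hlohi hlow hhigh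
    have : lo = hi := by omega
    subst this
    rw [bsLeft, dif_neg (by omega)]
    refine ⟨le_refl _, le_refl _, fun j hj => ?_⟩
    constructor
    · intro hlt
      by_contra hge
      exact absurd hlt (not_lt.mpr (hhigh j (by omega) hj))
    · intro hlt
      exact hlow j hlt
  | succ m ih =>
    intro lo hi hd hhi hlohi hlow hhigh
    by_cases h : lo < hi
    · rw [bsLeft, dif_pos h]
      simp only []
      by_cases hmid : xs.getD ((lo + hi) / 2) 0 < x
      · rw [if_pos hmid]
        have ih' := ih ((lo + hi) / 2 + 1) hi (by omega) hhi (by omega)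
          (fun j hj => lt_of_le_of_lt (mono j ((lo + hi) / 2) (by omega) (by omega) (by omega)) hmid)
          hhigh
        exact ⟨by omega, ih'.2.1, ih'.2.2⟩
      · rw [if_neg hmid]
        rw [not_lt] at hmid
        have ih' := ih lo ((lo + hi) / 2) (by omega) (by omega) (by omega) hlow
          (fun j hj hjlen => le_trans hmid (mono ((lo + hi) / 2) j hj (by omega) (by omega)))
        exact ⟨ih'.1, by omega, ih'.2.2⟩
    · rw [bsLeft, dif_neg h]
      have : lo = hi := by omega
      subst this
      refine ⟨le_refl _, le_refl _, fun j hj => ?_⟩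
      constructor
      · intro hlt
        by_contra hge
        exact absurd hlt (not_lt.mpr (hhigh j (by omega) hj))
      · intro hlt
        exact hlow j hlt

lemma paintRange_getD (f : Nat → String) :
    ∀ (n lo : Nat) (lbs : List (Option String)), lo + n ≤ lbs.length → ∀ k,
      ((List.range' lo n).foldl
        (fun L j => if L.getD j none = none then L.set j (some (f j)) else L) lbs).getD k none
      = if lo ≤ k ∧ k < lo + n ∧ lbs.getD k none = none then some (f k) else lbs.getD k none := by
  intro n
  induction n with
  | zero =>
    intro lo lbs _ k
    simp only [List.range'_zero, List.foldl_nil]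
    split
    · omega
    · rfl
  | succ m ih =>
    intro lo lbs hlen k
    rw [List.range'_succ, List.foldl_cons]
    set lbs1 := if lbs.getD lo none = none then lbs.set lo (some (f lo)) else lbs with hlbs1
    have hlen1 : lbs1.length = lbs.length := by
      rw [hlbs1]; split <;> simp
    rw [ih (lo + 1) lbs1 (by omega) k]
    have hget1 : ∀ j, lbs1.getD j none =
        if j = lo ∧ lbs.getD lo none = none then some (f lo) else lbs.getD j none := by
      intro j
      rw [hlbs1]
      by_cases h0 : lbs.getD lo none = none
      · rw [if_pos h0]
        by_cases hj : j = lo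
        · subst hj
          rw [if_pos ⟨rfl, h0⟩]
          have hjlt : j < lbs.length := by omega
          simp [List.getD_eq_getElem?_getD, hjlt]
        · rw [if_neg (by tauto)]
          simp [List.getD_eq_getElem?_getD, Ne.symm hj]
      · rw [if_neg h0, if_neg (by tauto)]
    rw [hget1 k]
    by_cases h0 : lbs.getD k none = none
    · by_cases hk : k = lo
      · subst hk
        rw [if_pos (show k = k ∧ lbs.getD k none = none from ⟨rfl, h0⟩), if_neg (by simp),
          if_pos (show k ≤ k ∧ k < k + (m + 1) ∧ lbs.getD k none = none from ⟨le_refl _, by omega, h0⟩)]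
      · rw [if_neg (show ¬(k = lo ∧ lbs.getD lo none = none) from fun h => hk h.1)]
        by_cases hr : lo + 1 ≤ k ∧ k < lo + 1 + m ∧ lbs.getD k none = none
        · rw [if_pos hr, if_pos (show lo ≤ k ∧ k < lo + (m + 1) ∧ lbs.getD k none = none from
            ⟨by omega, by omega, h0⟩)]
        · rw [if_neg hr, if_neg (show ¬(lo ≤ k ∧ k < lo + (m + 1) ∧ lbs.getD k none = none) from
            fun h => hr ⟨by omega, by omega, h0⟩)]
    · rw [if_neg (show ¬(k = lo ∧ lbs.getD lo none = none) from fun h => h0 (h.1.symm ▸ h.2)),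
        if_neg (show ¬(lo + 1 ≤ k ∧ k < lo + 1 + m ∧ lbs.getD k none = none) from fun h => h0 h.2.2),
        if_neg (show ¬(lo ≤ k ∧ k < lo + (m + 1) ∧ lbs.getD k none = none) from fun h => h0 h.2.2)]

lemma paintRange_length (f : Nat → String) :
    ∀ (n lo : Nat) (lbs : List (Option String)),
      ((List.range' lo n).foldl
        (fun L j => if L.getD j none = none then L.set j (some (f j)) else L) lbs).length
      = lbs.length := by
  intro n
  induction n with
  | zero => intro lo lbs; simp
  | succ m ih =>
    intro lo lbs
    rw [List.range'_succ, List.foldl_cons]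
    rw [ih]
    split <;> simp

lemma paintStep_length (starts ends : List Int) (labels : List (Option String)) (sp : Int × Int) :
    (paintStep starts ends labels sp).length = labels.length := by
  unfold paintStep
  exact paintRange_length _ _ _ _

-- first-match specification

def specLab : List (Int × Int) → Int × Int → Option String
  | [], _ => none
  | (ss, se) :: rest, p =>
    if p.1 < se ∧ ss < p.2 then some (if p.1 ≤ ss then "B-REF" else "I-REF") else specLab rest p

lemma specLab_append (P Q : List (Int × Int)) (p : Int × Int) :
    specLab (P ++ Q) p = ((specLab P p).map some).getD (specLab Q p) := by
  induction P with
  | nil => simp [specLab]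
  | cons q r ih =>
    obtain ⟨ss, se⟩ := q
    simp only [List.cons_append, specLab]
    split
    · rfl
    · exact ih

lemma labA_specLab (spans : List (Int × Int)) (ts te : Int) :
    labA spans ts te = (specLab spans (ts, te)).getD "O" := by
  induction spans with
  | nil => rfl
  | cons q r ih =>
    obtain ⟨ss, se⟩ := q
    simp only [labA, specLab]
    split
    · rfl
    · exact ih

-- one painting pass, pointwise, over ordered ranges

lemma paintStep_getD {L : List (Int × Int)} (ho : Ordered 0 L)
    (sp : Int × Int) (labels : List (Option String)) (hlen : labels.length = L.length)
    (j : Nat) (hj : j < L.length) :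
    (paintStep (L.map (fun p => p.1)) (L.map (fun p => p.2)) labels sp).getD j none
    = if ((L[j]'hj).1 < sp.2 ∧ sp.1 < (L[j]'hj).2) ∧ labels.getD j none = none
      then some (if (L[j]'hj).1 ≤ sp.1 then "B-REF" else "I-REF")
      else labels.getD j none := by
  have hslen : (L.map (fun p => p.1)).length = L.length := by simp
  have helen : (L.map (fun p => p.2)).length = L.length := by simp
  have hsget : ∀ k (hk : k < L.length), (L.map (fun p => p.1)).getD k 0 = L[k].1 := by
    intro k hk
    rw [List.getD_eq_getElem _ _ (by omega), List.getElem_map]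
  have heget : ∀ k (hk : k < L.length), (L.map (fun p => p.2)).getD k 0 = L[k].2 := by
    intro k hk
    rw [List.getD_eq_getElem _ _ (by omega), List.getElem_map]
  have hmonos : ∀ a b, (hab : a ≤ b) → (hb : b < (L.map (fun p => p.1)).length) → (ha : a < (L.map (fun p => p.1)).length) →
      (L.map (fun p => p.1)).getD a 0 ≤ (L.map (fun p => p.1)).getD b 0 := by
    intro a b hab hb ha
    rw [hsget a (by omega), hsget b (by omega)]
    exact (ordered_mono_getElem ho hab (by omega) (by omega)).1
  have hmonoe : ∀ a b, (hab : a ≤ b) → (hb : b < (L.map (fun p => p.2)).length) → (ha : a < (L.map (fun p => p.2)).length) →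
      (L.map (fun p => p.2)).getD a 0 ≤ (L.map (fun p => p.2)).getD b 0 := by
    intro a b hab hb ha
    rw [heget a (by omega), heget b (by omega)]
    exact (ordered_mono_getElem ho hab (by omega) (by omega)).2
  obtain ⟨hr0, hrhi, hriff⟩ := bsRight_char (L.map (fun p => p.2)) sp.1 hmonoe
    (L.map (fun p => p.2)).length 0 (L.map (fun p => p.2)).length (by omega) (le_refl _)
    (by omega) (fun a ha1 => absurd ha1 (Nat.not_lt_zero a)) (fun a ha1 ha2 => absurd ha2 (by omega))
  obtain ⟨hl0, hlhi, hliff⟩ := bsLeft_char (L.map (fun p => p.1)) sp.2 hmonos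
    (L.map (fun p => p.1)).length 0 (L.map (fun p => p.1)).length (by omega) (le_refl _)
    (by omega) (fun a ha1 => absurd ha1 (Nat.not_lt_zero a)) (fun a ha1 ha2 => absurd ha2 (by omega))
  set lo := bsRight (L.map (fun p => p.2)) sp.1 0 (L.map (fun p => p.2)).length with hlo
  set hi := bsLeft (L.map (fun p => p.1)) sp.2 0 (L.map (fun p => p.1)).length with hhi
  have hcond : (lo ≤ j ∧ j < lo + (hi - lo)) ↔ (L[j].1 < sp.2 ∧ sp.1 < L[j].2) := by
    have h1 := hliff j (by omega)
    have h2 := hriff j (by omega)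
    rw [hsget j hj] at h1
    rw [heget j hj] at h2
    constructor
    · intro hin
      refine ⟨h1.mpr (by omega), ?_⟩
      have : ¬ (L[j].2 ≤ sp.1) := by
        intro hle
        have := h2.mp hle
        omega
      omega
    · intro hov
      have hjhi := h1.mp hov.1
      have hjlo : ¬ j < lo := by
        intro hjlo
        have := h2.mpr hjlo
        omega
      omega
  rw [paintStep]
  rw [paintRange_getD _ (hi - lo) lo labels (by omega) j]
  rw [hsget j hj]
  by_cases hnl : labels.getD j none = none
  · by_cases hov : ((L[j]'hj).1 < sp.2 ∧ sp.1 < (L[j]'hj).2)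
    · have hc := hcond.mpr hov
      rw [if_pos (show lo ≤ j ∧ j < lo + (hi - lo) ∧ labels.getD j none = none from
          ⟨hc.1, hc.2, hnl⟩),
        if_pos (show ((L[j]'hj).1 < sp.2 ∧ sp.1 < (L[j]'hj).2) ∧ labels.getD j none = none from
          ⟨hov, hnl⟩)]
    · rw [if_neg (show ¬(lo ≤ j ∧ j < lo + (hi - lo) ∧ labels.getD j none = none) from
          fun h => hov (hcond.mp ⟨h.1, h.2.1⟩)),
        if_neg (show ¬(((L[j]'hj).1 < sp.2 ∧ sp.1 < (L[j]'hj).2) ∧ labels.getD j none = none) from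
          fun h => hov h.1)]
  · rw [if_neg (show ¬(lo ≤ j ∧ j < lo + (hi - lo) ∧ labels.getD j none = none) from
        fun h => hnl h.2.2),
      if_neg (show ¬(((L[j]'hj).1 < sp.2 ∧ sp.1 < (L[j]'hj).2) ∧ labels.getD j none = none) from
        fun h => hnl h.2)]

lemma paintFold_getD {L : List (Int × Int)} (ho : Ordered 0 L) :
    ∀ (Q P : List (Int × Int)) (labels : List (Option String)),
      labels.length = L.length →
      (∀ j, (hj : j < L.length) → labels.getD j none = specLab P L[j]) →
      ∀ j, (hj : j < L.length) →
        (Q.foldl (paintStep (L.map (fun p => p.1)) (L.map (fun p => p.2))) labels).getD j none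
          = specLab (P ++ Q) L[j] := by
  intro Q
  induction Q with
  | nil => intro P labels hlen hbase j hj; simpa using hbase j hj
  | cons q Qtl ih =>
    intro P labels hlen hbase j hj
    rw [List.foldl_cons]
    have hlen1 : (paintStep (L.map (fun p => p.1)) (L.map (fun p => p.2)) labels q).length = L.length := by
      rw [paintStep_length]; exact hlen
    have hbase1 : ∀ j, (hj : j < L.length) →
        (paintStep (L.map (fun p => p.1)) (L.map (fun p => p.2)) labels q).getD j none
          = specLab (P ++ [q]) L[j] := by
      intro j hj
      rw [paintStep_getD ho q labels hlen j hj, hbase j hj, specLab_append]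
      obtain ⟨ss, se⟩ := q
      cases hP : specLab P L[j] with
      | some l => simp [specLab]
      | none => simp [specLab]
    have := ih (P ++ [q]) _ hlen1 hbase1 j hj
    simpa using this

lemma paintFold_length (starts ends : List Int) :
    ∀ (Q : List (Int × Int)) (labels : List (Option String)),
      (Q.foldl (paintStep starts ends) labels).length = labels.length := by
  intro Q
  induction Q with
  | nil => intro labels; rfl
  | cons q Qtl ih =>
    intro labels
    rw [List.foldl_cons, ih, paintStep_length]

lemma spans_to_bio_eq_alt (text : String) (char_spans : List (Int × Int)) :
    spans_to_bio text char_spans = spans_to_bio_alt text char_spans := by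
  rw [spans_to_bio, spans_to_bio_alt, tokB_eq]
  have hL : rangesOf text.toList 0
      = (tokA text.toList 0).map (fun t => (((t.2.1 : Nat) : Int), ((t.2.2 : Nat) : Int))) := rfl
  have hs : (tokA text.toList 0).map (fun t => ((t.2.1 : Nat) : Int))
      = (rangesOf text.toList 0).map (fun p => p.1) := by
    rw [hL, List.map_map]; rfl
  have he : (tokA text.toList 0).map (fun t => ((t.2.2 : Nat) : Int))
      = (rangesOf text.toList 0).map (fun p => p.2) := by
    rw [hL, List.map_map]; rfl
  have hLlen : (rangesOf text.toList 0).length = (tokA text.toList 0).length := by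
    rw [hL]; exact List.length_map ..
  have ho : Ordered 0 (rangesOf text.toList 0) := by
    have := tokA_ordered text.toList 0
    simpa using this
  simp only [hs, he]
  refine Prod.ext ?_ ?_
  · dsimp only
    simp [List.map_map]
  · dsimp only
    have hlabels := paintFold_getD ho char_spans []
      (List.replicate ((tokA text.toList 0).map (fun t => t.1)).length none)
      (by simp [hLlen])
      (by intro j hj
          simp [specLab])
    apply List.ext_getElem
    · simp [paintFold_length]
    · intro j hj1 hj2
      have hjR : j < (tokA text.toList 0).length := by simpa using hj1
      have hjL : j < (rangesOf text.toList 0).length := by omega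
      have hfoldlen : (char_spans.foldl
          (paintStep ((rangesOf text.toList 0).map (fun p => p.1))
            ((rangesOf text.toList 0).map (fun p => p.2)))
          (List.replicate ((tokA text.toList 0).map (fun t => t.1)).length none)).length
          = ((tokA text.toList 0).map (fun t => t.1)).length := by
        rw [paintFold_length, List.length_replicate]
      have hfold := hlabels j hjL
      simp only [List.nil_append] at hfold
      rw [List.getD_eq_getElem _ none (by simp at hfoldlen ⊢; omega)] at hfold
      simp only [List.getElem_map]
      rw [hfold, labA_specLab]
      have hLj : (rangesOf text.toList 0)[j]'hjL
          = ((((tokA text.toList 0)[j]'hjR).2.1 : Int), (((tokA text.toList 0)[j]'hjR).2.2 : Int)) := by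
        simp only [rangesOf, List.getElem_map]
      exact congrArg (fun p => (specLab char_spans p).getD "O") hLj.symm

-- ===== VERDICT (by name: the statement is the Claim_ definition above) =====
theorem spans_to_bio_spec : Claim_equal_spans_to_bio := by
  intro text char_spans _
  unfold Spec_spans_to_bio
  exact spans_to_bio_eq_alt text char_spans
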